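-- pv_equiv track=rewrite | github.com/oneisnot/ruichangmj | test_scoring.py | is_peng_peng_hu
-- ===== SOURCE A (Python) =====
-- from collections import Counter
--
-- def is_peng_peng_hu(hand, melds):
--     # 只有刻子和将牌
--     if len(hand) % 3 != 2: return False
--     c = Counter(hand)
--     pairs = 0
--     tris = 0
--     for count in c.values():
--         if count == 2:
--             pairs += 1
--         elif count == 3:
--             tris += 1
--         elif count == 4: # 当作一个碰和一个单张是不行的
--             return False
--         else:
--             return False
--     return pairs == 1
-- ===== SOURCE B (Python) =====
-- def is_peng_peng_hu(hand, melds):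
--     # greedy lookahead scan of the sorted hand with a pair_used flag (no tallying)
--     if len(hand) % 3 != 2:
--         return False
--     s = sorted(hand)
--     n = len(s)
--     i = 0
--     pair_used = False
--     while i < n:
--         if i + 3 <= n and s[i] == s[i+1] == s[i+2] and (i + 3 == n or s[i+3] != s[i]):
--             i += 3
--         elif i + 2 <= n and s[i] == s[i+1] and (i + 2 == n or s[i+2] != s[i]) and not pair_used:
--             i += 2
--             pair_used = True
--         else:
--             return False
--     return pair_used
-- ===== Notes on version B (the rewrite author's own statement) =====
-- stated objective: alternative
-- what changed: Replaces the Counter tally and pairs/tris count-loop by a greedy pattern-matching scan over the sorted hand: repeatedly consume a triplet (with a lookahead that the next tile differs) or, at most once, a pair, tracking only a pair_used flag and no counts.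
import Mathlib
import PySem

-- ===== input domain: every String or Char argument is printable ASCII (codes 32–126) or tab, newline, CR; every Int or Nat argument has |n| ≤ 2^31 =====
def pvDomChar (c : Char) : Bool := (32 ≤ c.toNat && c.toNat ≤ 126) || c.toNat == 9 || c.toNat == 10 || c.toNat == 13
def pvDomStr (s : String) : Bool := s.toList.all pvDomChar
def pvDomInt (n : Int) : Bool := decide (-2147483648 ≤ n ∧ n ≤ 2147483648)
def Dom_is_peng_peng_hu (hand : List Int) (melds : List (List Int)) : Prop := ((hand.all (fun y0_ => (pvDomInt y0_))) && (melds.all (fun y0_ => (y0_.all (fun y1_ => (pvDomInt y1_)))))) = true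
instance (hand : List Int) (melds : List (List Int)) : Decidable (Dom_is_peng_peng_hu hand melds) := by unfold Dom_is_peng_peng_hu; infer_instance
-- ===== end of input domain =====

-- B replaces A's Counter tally and pairs/tris count-loop by a greedy pattern-matching scan of the
-- sorted hand (consume a triplet, or at most once a pair, with a lookahead), tracking only a flag.
-- ===== PORT A =====
-- loop over the Counter's values with pairs/tris accumulators; `none` = early `return False`
def pvALoop : List Int → Int → Int → Option (Int × Int)
  | [], pairs, tris => some (pairs, tris)
  | count :: rest, pairs, tris =>
    if count = 2 then pvALoop rest (pairs + 1) tris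
    else if count = 3 then pvALoop rest pairs (tris + 1)
    else none  -- count == 4 and the final else both `return False`

def is_peng_peng_hu (hand : List Int) (melds : List (List Int)) : Bool :=
  if hand.length % 3 ≠ 2 then false
  else
    match pvALoop (PySem.Dict.counter hand).values 0 0 with
    | none => false
    | some (pairs, _tris) => pairs == 1

-- ===== PORT B =====
-- the `while i < n` scan of Source B: each step consumes a triplet (lookahead: next tile differs)
-- or, if pair_used is still false, a pair (same lookahead); the index i becomes the suffix
def pvConsume : List Int → Bool → Bool
  | [], pu => pu
  | [_], _ => false
  | [x, y], pu => if x = y ∧ pu = false then pvConsume [] true else false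
  | x :: y :: z :: rest, pu =>
    if x = y ∧ y = z ∧ rest.head? ≠ some x then pvConsume rest pu
    else if x = y ∧ z ≠ x ∧ pu = false then pvConsume (z :: rest) true
    else false
termination_by l _ => l.length

def is_peng_peng_hu_alt (hand : List Int) (melds : List (List Int)) : Bool :=
  if hand.length % 3 ≠ 2 then false
  else pvConsume (PySem.List.sorted hand (fun x => x) false) false

-- ===== PRECONDITION & SPEC =====
def Spec_is_peng_peng_hu (hand : List Int) (melds : List (List Int)) (out : Bool) : Prop := out = is_peng_peng_hu_alt hand melds
instance (hand : List Int) (melds : List (List Int)) (out : Bool) : Decidable (Spec_is_peng_peng_hu hand melds out) := by unfold Spec_is_peng_peng_hu; infer_instance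

-- ===== CLAIM (what is proved, stated in full; the proofs are below) =====
def Claim_equal_is_peng_peng_hu : Prop := ∀ (hand : List Int) (melds : List (List Int)), Dom_is_peng_peng_hu hand melds → Spec_is_peng_peng_hu hand melds (is_peng_peng_hu hand melds)

-- ===== LEMMAS AND PROOFS =====

-- the multiset of tile counts, keyed by first occurrence
def pvVals (l : List Int) : List Int := (PySem.Set.ofList l).map (fun k => (l.count k : Int))

-- the order-insensitive verdict both programs compute: every count is 2 or 3, and p plus the number of pairs is 1
def pvOk (vals : List Int) (p : Int) : Bool :=
  vals.all (fun v => v == 2 || v == 3) && decide (p + (vals.count 2 : Int) = 1)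

lemma pvALoop_eq (vals : List Int) : ∀ (p t : Int),
    pvALoop vals p t =
      if vals.all (fun v => v == 2 || v == 3) then some (p + (vals.count 2 : Int), t + (vals.count 3 : Int)) else none := by
  induction vals with
  | nil => intro p t; simp [pvALoop]
  | cons v rest ih =>
    intro p t
    simp only [pvALoop, List.all_cons, List.count_cons]
    by_cases h2 : v = 2
    · subst h2
      simp [ih]
      split <;> simp <;> ring
    · by_cases h3 : v = 3
      · subst h3
        simp [ih]
        split <;> simp <;> ring
      · simp [h2, h3]

lemma pvOk_perm {v v' : List Int} (h : v.Perm v') (p : Int) : pvOk v p = pvOk v' p := by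
  unfold pvOk
  rw [h.count_eq, h.all_eq]

lemma pvNoX (x : Int) : ∀ (rest : List Int), rest.Pairwise (· ≤ ·) → (∀ y ∈ rest, x ≤ y) →
    ∀ y ∈ rest.dropWhile (· == x), y ≠ x := by
  intro rest
  induction rest with
  | nil => simp
  | cons r rs ih =>
    intro hp hx y hy
    by_cases hr : r = x
    · rw [List.dropWhile_cons_of_pos (by simp [hr])] at hy
      exact ih hp.of_cons (fun z hz => hx z (List.mem_cons_of_mem _ hz)) y hy
    · rw [List.dropWhile_cons_of_neg (by simp [hr])] at hy
      have hxr : x < r := lt_of_le_of_ne (hx r (List.mem_cons_self)) (Ne.symm hr)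
      rcases List.mem_cons.mp hy with rfl | hmem
      · exact hr
      · have : r ≤ y := (List.pairwise_cons.mp hp).1 y hmem
        omega

lemma pvVals_cons_perm (x : Int) (rest : List Int) (h : rest.Pairwise (· ≤ ·)) (hx : ∀ y ∈ rest, x ≤ y) :
    (pvVals (x :: rest)).Perm (((x :: rest).count x : Int) :: pvVals (rest.dropWhile (· == x))) := by
  set tail := rest.dropWhile (· == x) with htail
  have hno : ∀ y ∈ tail, y ≠ x := pvNoX x rest h hx
  have hsplit : rest = rest.takeWhile (· == x) ++ tail := (List.takeWhile_append_dropWhile).symm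
  have htake : ∀ y ∈ rest.takeWhile (· == x), y = x := by
    intro y hy
    have := List.mem_takeWhile_imp hy
    simpa using this
  have hmem : ∀ y, y ∈ x :: rest ↔ (y = x ∨ y ∈ tail) := by
    intro y
    constructor
    · intro hy
      rcases List.mem_cons.mp hy with rfl | hy
      · exact Or.inl rfl
      · rw [hsplit] at hy
        rcases List.mem_append.mp hy with h1 | h2
        · exact Or.inl (htake y h1)
        · exact Or.inr h2
    · rintro (rfl | hy)
      · exact List.mem_cons_self
      · rw [hsplit]
        exact List.mem_cons_of_mem _ (List.mem_append.mpr (Or.inr hy))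
  have hxnot : x ∉ PySem.Set.ofList tail := by
    intro hmem'
    exact hno x (by rw [PySem.Set.mem_ofList] at hmem'; exact hmem') rfl
  have hperm : (PySem.Set.ofList (x :: rest)).Perm (x :: PySem.Set.ofList tail) := by
    apply (List.perm_ext_iff_of_nodup (PySem.Set.nodup_ofList _) _).mpr
    · intro y
      rw [PySem.Set.mem_ofList, hmem, List.mem_cons, PySem.Set.mem_ofList]
    · exact List.nodup_cons.mpr ⟨hxnot, PySem.Set.nodup_ofList _⟩
  have hcnt : ∀ k ∈ PySem.Set.ofList tail, ((x :: rest).count k : Int) = (tail.count k : Int) := by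
    intro k hk
    have hktail : k ∈ tail := by rw [PySem.Set.mem_ofList] at hk; exact hk
    have hkx : k ≠ x := hno k hktail
    have c1 : (rest.takeWhile (· == x)).count k = 0 := by
      apply List.count_eq_zero.mpr
      intro hkin
      exact hkx (htake k hkin)
    conv_lhs => rw [hsplit]
    rw [List.count_cons, List.count_append, c1]
    simp; omega
  have h1 : (pvVals (x :: rest)).Perm
      ((x :: PySem.Set.ofList tail).map (fun k => ((x :: rest).count k : Int))) := hperm.map _
  have h2 : ((x :: PySem.Set.ofList tail).map (fun k => ((x :: rest).count k : Int)))
      = ((x :: rest).count x : Int) :: pvVals tail := by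
    simp only [List.map_cons]
    congr 1
    exact List.map_congr_left hcnt
  exact h2 ▸ h1

lemma pvOk_cons_two (vs : List Int) (p : Int) : pvOk ((2 : Int) :: vs) p = pvOk vs (p + 1) := by
  have h : p + ((vs.count 2 : Int) + 1) = 1 ↔ p + 1 + (vs.count 2 : Int) = 1 := by omega
  simp [pvOk, h]

lemma pvOk_cons_three (vs : List Int) (p : Int) : pvOk ((3 : Int) :: vs) p = pvOk vs p := by
  simp [pvOk]

lemma pvOk_cons_other (v : Int) (vs : List Int) (p : Int) (h2 : v ≠ 2) (h3 : v ≠ 3) :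
    pvOk (v :: vs) p = false := by
  simp [pvOk, h2, h3]

lemma pvOk_two_le (vs : List Int) (p : Int) (h : 2 ≤ p) : pvOk vs p = false := by
  unfold pvOk
  have hc : (0 : Int) ≤ (vs.count 2 : Int) := Int.natCast_nonneg _
  rw [decide_eq_false (by omega), Bool.and_false]

lemma pvCount_head (x : Int) (rest : List Int)
    (htake : ∀ y ∈ rest.takeWhile (· == x), y = x)
    (hno : ∀ y ∈ rest.dropWhile (· == x), y ≠ x) :
    (x :: rest).count x = 1 + (rest.takeWhile (· == x)).length := by
  have c1 : (rest.takeWhile (· == x)).count x = (rest.takeWhile (· == x)).length :=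
    List.count_eq_length.mpr (fun b hb => (htake b hb).symm)
  have c2 : (rest.dropWhile (· == x)).count x = 0 :=
    List.count_eq_zero.mpr (fun hmem => hno x hmem rfl)
  conv_lhs => rw [show rest = rest.takeWhile (· == x) ++ rest.dropWhile (· == x) from
    (List.takeWhile_append_dropWhile).symm]
  rw [List.count_cons, List.count_append, c1, c2]
  simp; omega

lemma pvConsume_sorted : ∀ (n : Nat) (s : List Int), s.length ≤ n → s.Pairwise (· ≤ ·) →
    ∀ pu : Bool, pvConsume s pu = pvOk (pvVals s) (if pu then 1 else 0) := by
  intro n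
  induction n with
  | zero =>
    intro s hlen _ pu
    have : s = [] := List.length_eq_zero_iff.mp (Nat.le_zero.mp hlen)
    subst this
    cases pu <;> simp [pvConsume, pvVals, pvOk, PySem.Set.ofList] <;> rfl
  | succ n ih =>
    intro s hlen hsort pu
    match s with
    | [] => cases pu <;> simp [pvConsume, pvVals, pvOk, PySem.Set.ofList] <;> rfl
    | x :: rest =>
      have hx : ∀ y ∈ rest, x ≤ y := (List.pairwise_cons.mp hsort).1
      have hp : rest.Pairwise (· ≤ ·) := (List.pairwise_cons.mp hsort).2
      have htake : ∀ y ∈ rest.takeWhile (· == x), y = x := by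
        intro y hy
        have := List.mem_takeWhile_imp hy
        simpa using this
      have hno : ∀ y ∈ rest.dropWhile (· == x), y ≠ x := pvNoX x rest hp hx
      have hsplit : rest = rest.takeWhile (· == x) ++ rest.dropWhile (· == x) :=
        (List.takeWhile_append_dropWhile).symm
      have hcnt := pvCount_head x rest htake hno
      have hdsort : (rest.dropWhile (· == x)).Pairwise (· ≤ ·) :=
        hp.sublist (List.dropWhile_sublist _)
      have hdlen : (rest.dropWhile (· == x)).length ≤ n := by
        have := List.length_dropWhile_le (p := (· == x)) (l := rest)
        simp only [List.length_cons] at hlen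
        omega
      rw [pvOk_perm (pvVals_cons_perm x rest hp hx)]
      set t := rest.takeWhile (· == x) with htdef
      set d := rest.dropWhile (· == x) with hddef
      match ht : t with
      | [] =>
        -- run length 1
        have hcnt1 : ((x :: rest).count x : Int) = 1 := by rw [hcnt]; simp
        rw [hcnt1, pvOk_cons_other 1 _ _ (by norm_num) (by norm_num)]
        have hrd : rest = d := by simpa using hsplit
        match hd : d with
        | [] =>
          rw [hrd]; simp [pvConsume]
        | y :: d' =>
          have hyx : y ≠ x := hno y List.mem_cons_self
          rw [hrd]
          match d' with
          | [] =>
            simp only [pvConsume]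
            rw [if_neg (by rintro ⟨h, -⟩; exact hyx h.symm)]
          | z :: d'' =>
            simp only [pvConsume]
            rw [if_neg (by rintro ⟨h, -, -⟩; exact hyx h.symm),
                if_neg (by rintro ⟨h, -, -⟩; exact hyx h.symm)]
      | [a] =>
        -- run length 2
        have hax : a = x := htake a List.mem_cons_self
        have hcnt2 : ((x :: rest).count x : Int) = 2 := by rw [hcnt]; simp
        have hrd : rest = x :: d := by simpa [hax] using hsplit
        rw [hcnt2, pvOk_cons_two]
        match hd : d with
        | [] =>
          rw [hrd]
          cases pu <;> simp [pvConsume, pvVals, pvOk, PySem.Set.ofList] <;> rfl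
        | z :: d' =>
          have hzx : z ≠ x := hno z List.mem_cons_self
          rw [hrd]
          show pvConsume (x :: x :: z :: d') pu = _
          rw [pvConsume]
          rw [if_neg (by rintro ⟨-, h, -⟩; exact hzx h.symm)]
          cases pu with
          | false =>
            rw [if_pos ⟨rfl, hzx, rfl⟩]
            have := ih (z :: d') hdlen hdsort true
            simpa using this
          | true =>
            rw [if_neg (by rintro ⟨-, -, h⟩; cases h)]
            rw [pvOk_two_le _ _ (by norm_num)]
      | [a, b] =>
        -- run length 3
        have hax : a = x := htake a List.mem_cons_self
        have hbx : b = x := htake b (by simp)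
        have hcnt3 : ((x :: rest).count x : Int) = 3 := by rw [hcnt]; simp
        have hrd : rest = x :: x :: d := by simpa [hax, hbx] using hsplit
        rw [hcnt3, pvOk_cons_three]
        rw [hrd]
        show pvConsume (x :: x :: x :: d) pu = _
        rw [pvConsume]
        have hdhead : d.head? ≠ some x := by
          match hd : d with
          | [] => simp
          | w :: d' =>
            have : w ≠ x := hno w List.mem_cons_self
            simpa using this
        rw [if_pos ⟨rfl, rfl, hdhead⟩]
        exact ih d hdlen hdsort pu
      | a :: b :: c :: t' =>
        -- run length ≥ 4
        have hax : a = x := htake a List.mem_cons_self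
        have hbx : b = x := htake b (by simp)
        have hcx : c = x := htake c (by simp)
        have hcnt4 : ((x :: rest).count x : Int) = 4 + t'.length := by
          rw [hcnt]; simp; ring
        have hrd : rest = x :: x :: x :: (t' ++ d) := by simpa [hax, hbx, hcx] using hsplit
        have hn0 : (0:Int) ≤ (t'.length : Int) := Int.natCast_nonneg _
        rw [hcnt4, pvOk_cons_other _ _ _ (by omega) (by omega)]
        rw [hrd]
        show pvConsume (x :: x :: x :: x :: (t' ++ d)) pu = false
        rw [pvConsume]
        rw [if_neg (by rintro ⟨-, -, h⟩; simp at h)]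
        rw [if_neg (by rintro ⟨-, h, -⟩; exact h rfl)]

-- ===== VERDICT (by name: the statement is the Claim_ definition above) =====
theorem is_peng_peng_hu_spec : Claim_equal_is_peng_peng_hu := by
  intro hand melds _
  unfold Spec_is_peng_peng_hu is_peng_peng_hu is_peng_peng_hu_alt
  split_ifs with hg
  · rfl
  · have hv : (PySem.Dict.counter hand).values = pvVals hand := by
      simp [PySem.Dict.values, PySem.Dict.items_counter, pvVals, List.map_map]
    have hsp : (PySem.List.sorted hand (fun x => x) false).Perm hand := PySem.List.sorted_perm hand (fun x => x) false
    have hpair : (PySem.List.sorted hand (fun x => x) false).Pairwise (· ≤ ·) := by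
      simpa using PySem.List.sorted_pairwise (xs := hand) (key := fun x => x)
    have hB : pvConsume (PySem.List.sorted hand (fun x => x) false) false
        = pvOk (pvVals (PySem.List.sorted hand (fun x => x) false)) 0 :=
      pvConsume_sorted _ _ le_rfl hpair false
    have hofl : (PySem.Set.ofList (PySem.List.sorted hand (fun x => x) false)).Perm (PySem.Set.ofList hand) := by
      apply (List.perm_ext_iff_of_nodup (PySem.Set.nodup_ofList _) (PySem.Set.nodup_ofList _)).mpr
      intro y
      rw [PySem.Set.mem_ofList, PySem.Set.mem_ofList, hsp.mem_iff]
    have hfun : (fun k => (((PySem.List.sorted hand (fun x => x) false).count k : Int)))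
        = (fun k => ((hand.count k : Int))) := funext (fun k => by rw [hsp.count_eq])
    have hpv : (pvVals (PySem.List.sorted hand (fun x => x) false)).Perm (pvVals hand) := by
      unfold pvVals
      rw [hfun]
      exact hofl.map _
    rw [hv, pvALoop_eq, hB, pvOk_perm hpv]
    by_cases hall : (pvVals hand).all (fun v => v == 2 || v == 3)
    · rw [if_pos hall]
      simp [pvOk, hall]
      by_cases hc : (pvVals hand).count 2 = 1 <;> simp [hc]
    · rw [if_neg hall]
      simp [pvOk, hall]
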